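-- pv_equiv track=rewrite | github.com/ocabanas/Integral_BMS_Governing_Equations | Logistic/exhaustive_linear_MS.py | get_expressions_n
-- ===== SOURCE A (Python) =====
-- from itertools import combinations
--
-- def get_expressions_n(the_vars, n=2):
--     if n == 0:
--         return [("_a0_", 1)]
--     groups = combinations(the_vars, n)
--     all_exp = []
--     for vs in groups:
--         expres, npar = "(_a0_ + (_a1_ * %s))" % vs[0], 2
--         for nv, v in enumerate(vs[1:]):
--             expres = "(%s + (_a%d_ * %s))" % (expres, nv + 2, v)
--             npar += 1
--         all_exp.append((expres, npar))
--     return all_exp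
-- ===== SOURCE B (Python) =====
-- def get_expressions_n(the_vars, n=2):
--     if n == 0:
--         return [("_a0_", 1)]
--     prefix = "(" * (n - 1)
--
--     def chunk(idx, v):
--         if idx == 1:
--             return "(_a0_ + (_a1_ * %s))" % v
--         return " + (_a%d_ * %s))" % (idx, v)
--
--     def go(vars_left, k, parts):
--         # take/skip backtracking: emit one finished expression per chosen n-subset
--         if k == 0:
--             return [(prefix + "".join(parts), n + 1)]
--         if not vars_left:
--             return []
--         v, rest = vars_left[0], vars_left[1:]
--         return go(rest, k - 1, parts + [chunk(n - k + 1, v)]) + go(rest, k, parts)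
--
--     return go(the_vars, n, [])
-- ===== Notes on version B (the rewrite author's own statement) =====
-- stated objective: alternative
-- what changed: B drops itertools.combinations and the inner string-re-wrapping loop entirely: a take/skip backtracking recursion over the variable list emits each n-subset's expression directly, assembling it flat as a constant '('*(n-1) prefix plus one independent chunk per chosen variable joined once, with npar = n + 1 computed directly.
import Mathlib
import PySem

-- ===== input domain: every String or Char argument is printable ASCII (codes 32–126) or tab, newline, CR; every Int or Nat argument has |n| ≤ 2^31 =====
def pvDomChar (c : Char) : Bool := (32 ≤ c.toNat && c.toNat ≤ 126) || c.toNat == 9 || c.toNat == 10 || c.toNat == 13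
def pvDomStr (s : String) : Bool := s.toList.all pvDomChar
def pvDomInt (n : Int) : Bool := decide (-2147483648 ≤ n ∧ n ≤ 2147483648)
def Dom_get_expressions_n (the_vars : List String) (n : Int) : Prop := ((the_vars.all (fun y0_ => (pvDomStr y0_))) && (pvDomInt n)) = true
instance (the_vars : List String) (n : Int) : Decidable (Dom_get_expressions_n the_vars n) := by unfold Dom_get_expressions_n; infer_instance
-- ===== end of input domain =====

-- B replaces itertools.combinations plus the inner string-re-wrapping loop by a take/skip
-- backtracking recursion that emits each subset's expression flat ('('*(n-1) prefix, one
-- independent chunk per chosen variable, one join; npar = n + 1 directly); objective: alternative.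

-- ===== PORT A =====
-- itertools.combinations(l, k) in index order
def pyCombinations {α : Type} : Nat → List α → List (List α)
  | 0, _ => [[]]
  | _+1, [] => []
  | k+1, x :: xs => (pyCombinations k xs).map (x :: ·) ++ pyCombinations (k+1) xs

-- inner loop body: expres = "(%s + (_a%d_ * %s))" % (expres, nv+2, v); npar += 1
def pvStepA (st : String × Int) (p : Int × String) : String × Int :=
  ("(" ++ st.1 ++ " + (_a" ++ PySem.Int.toStr (p.1 + 2) ++ "_ * " ++ p.2 ++ "))", st.2 + 1)

-- one combination vs: vs[0] / vs[1:] realised by destructuring ([] unreachable: n ≥ 1)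
def pvBuildA (vs : List String) : String × Int :=
  match vs with
  | [] => ("", 0)
  | v0 :: rest =>
    (PySem.List.enumerate rest).foldl pvStepA ("(_a0_ + (_a1_ * " ++ v0 ++ "))", 2)

def get_expressions_n (the_vars : List String) (n : Int) : List (String × Int) :=
  if n == 0 then [("_a0_", 1)]
  else (pyCombinations n.toNat the_vars).foldl (fun acc vs => acc ++ [pvBuildA vs]) []

-- ===== PORT B =====
-- chunk(idx, v)
def pvChunkB (idx : Int) (v : String) : String :=
  if idx = 1 then "(_a0_ + (_a1_ * " ++ v ++ "))"
  else " + (_a" ++ PySem.Int.toStr idx ++ "_ * " ++ v ++ "))"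

-- prefix = "(" * (n - 1)
def pvPrefixB (n : Int) : String := String.ofList (List.replicate (n - 1).toNat '(')

-- go(vars_left, k, parts): take/skip backtracking (k stays a Python int)
def pvGoB (n : Int) : List String → Int → List String → List (String × Int)
  | vars, k, parts =>
    if k == 0 then [(pvPrefixB n ++ PySem.Str.join "" parts, n + 1)]
    else
      match vars with
      | [] => []
      | v :: rest =>
        pvGoB n rest (k - 1) (parts ++ [pvChunkB (n - k + 1) v]) ++ pvGoB n rest k parts
termination_by structural vars => vars

def get_expressions_n_alt (the_vars : List String) (n : Int) : List (String × Int) :=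
  if n == 0 then [("_a0_", 1)]
  else pvGoB n the_vars n []

-- ===== PRECONDITION & SPEC =====
-- Pre_ excludes n < 0, on which A raises ValueError from itertools.combinations.
def Pre_get_expressions_n (the_vars : List String) (n : Int) : Prop := 0 ≤ n
instance (the_vars : List String) (n : Int) : Decidable (Pre_get_expressions_n the_vars n) := by unfold Pre_get_expressions_n; infer_instance

def pvWitness_get_expressions_n : List String × Int := (["x", "y"], 2)

def Spec_get_expressions_n (the_vars : List String) (n : Int) (out : List (String × Int)) : Prop := out = get_expressions_n_alt the_vars n
instance (the_vars : List String) (n : Int) (out : List (String × Int)) : Decidable (Spec_get_expressions_n the_vars n out) := by unfold Spec_get_expressions_n; infer_instance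

-- ===== CLAIM (what is proved, stated in full; the proofs are below) =====
def Claim_equal_get_expressions_n : Prop := ∀ (the_vars : List String) (n : Int), Dom_get_expressions_n the_vars n → Pre_get_expressions_n the_vars n → Spec_get_expressions_n the_vars n (get_expressions_n the_vars n)

-- ===== LEMMAS AND PROOFS =====

-- suffix chunk as A produces it (proof-side only)
def pvSuffix (p : Int × String) : String :=
  " + (_a" ++ PySem.Int.toStr (p.1 + 2) ++ "_ * " ++ p.2 ++ "))"

-- chunk list of a combination vs (|vs| = m), highest remaining count first (proof-side only)
def pvChunks (n : Int) : Nat → List String → List String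
  | _, [] => []
  | 0, _ :: _ => []
  | k+1, v :: rest => pvChunkB (n - k) v :: pvChunks n k rest

-- every member of pyCombinations k l has length k
theorem pvComb_length {α : Type} : ∀ (k : Nat) (l : List α) (vs : List α),
    vs ∈ pyCombinations k l → vs.length = k := by
  intro k l
  induction l generalizing k with
  | nil =>
    intro vs h
    cases k with
    | zero => simp [pyCombinations] at h; simp [h]
    | succ k => simp [pyCombinations] at h
  | cons x xs ih =>
    intro vs h
    cases k with
    | zero => simp [pyCombinations] at h; simp [h]
    | succ k =>
      simp [pyCombinations] at h
      rcases h with ⟨ws, hw, rfl⟩ | h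
      · simp [ih k ws hw]
      · exact ih (k+1) vs h

-- accumulate-by-append is map
theorem pvFoldl_append_map {α β : Type} (f : α → β) :
    ∀ (l : List α) (acc : List β),
      l.foldl (fun acc vs => acc ++ [f vs]) acc = acc ++ l.map f := by
  intro l
  induction l with
  | nil => simp
  | cons x xs ih => intro acc; simp [List.foldl_cons, ih]

-- "".join at sep = "" is flatten
theorem pvJoin_empty : ∀ (L : List (List Char)), PySem.Chars.join [] L = L.flatten := by
  intro L
  induction L with
  | nil => simp [PySem.Chars.join_nil]
  | cons x l ih =>
    cases l with
    | nil => simp [PySem.Chars.join_singleton]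
    | cons y m => rw [PySem.Chars.join_cons_cons]; simp_all

-- A's re-wrapping fold, characterised: prefix of one '(' per step, suffix chunks joined
theorem pvFoldA_char : ∀ (rest : List String) (j : Int) (s : String) (c : Int),
    (PySem.List.enumerate rest j).foldl pvStepA (s, c)
      = (String.ofList (List.replicate rest.length '(') ++ s
           ++ PySem.Str.join "" ((PySem.List.enumerate rest j).map pvSuffix),
         c + rest.length) := by
  intro rest
  induction rest with
  | nil =>
    intro j s c
    refine Prod.ext ?_ (by simp)
    apply String.toList_inj.mp
    simp [PySem.List.enumerate_nil, PySem.Str.toList_join, PySem.Chars.join_nil]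
  | cons x xs ih =>
    intro j s c
    rw [PySem.List.enumerate_cons, List.foldl_cons, pvStepA, ih]
    refine Prod.ext ?_ (by simp; omega)
    apply String.toList_inj.mp
    simp [PySem.Str.toList_join, pvJoin_empty, List.replicate_succ',
          pvSuffix, List.append_assoc]

-- B's backtracking recursion, characterised over combinations
theorem pvGoB_eq (n : Int) : ∀ (vars : List String) (k : Nat) (parts : List String),
    pvGoB n vars (k : Int) parts
      = (pyCombinations k vars).map
          (fun vs => (pvPrefixB n ++ PySem.Str.join "" (parts ++ pvChunks n k vs), n + 1)) := by
  intro vars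
  induction vars with
  | nil =>
    intro k parts
    cases k with
    | zero => simp [pvGoB, pyCombinations, pvChunks]
    | succ k => simp [pvGoB, pyCombinations]; omega
  | cons v rest ih =>
    intro k parts
    cases k with
    | zero => simp [pvGoB, pyCombinations, pvChunks]
    | succ k =>
      rw [pvGoB]
      have hne : (((k+1 : Nat) : Int) == 0) = false := by simp; omega
      rw [hne]
      simp only [Bool.false_eq_true, if_false]
      have h1 : ((k+1 : Nat) : Int) - 1 = (k : Int) := by push_cast; ring
      have h2 : n - ((k+1 : Nat) : Int) + 1 = n - (k : Int) := by push_cast; ring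
      rw [h1, h2, ih, ih]
      simp only [pyCombinations, List.map_append, List.map_map]
      congr 1
      refine List.map_congr_left (fun ws _ => ?_)
      simp only [Function.comp, pvChunks, List.append_assoc, List.singleton_append]

-- the chunk list of a combination, rewritten as the enumerate-mapped suffix chunks
theorem pvChunks_enum (n : Int) : ∀ (ws : List String), 1 ≤ n - ws.length →
    pvChunks n ws.length ws
      = (PySem.List.enumerate ws (n - ws.length - 1)).map pvSuffix := by
  intro ws
  induction ws with
  | nil => intro h; simp [pvChunks, PySem.List.enumerate_nil]
  | cons w ws ih =>
    intro h
    simp only [List.length_cons] at h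
    have h2 : 1 ≤ n - (ws.length : Int) := by push_cast at h ⊢; omega
    simp only [List.length_cons, pvChunks]
    rw [PySem.List.enumerate_cons, List.map_cons, ih h2]
    have hidx : n - ((ws.length : Int) + 1) - 1 + 1 = n - ws.length - 1 := by ring
    have hhead : pvChunkB (n - ws.length) w = pvSuffix (n - ((ws.length : Int) + 1) - 1, w) := by
      unfold pvChunkB pvSuffix
      rw [if_neg (by omega)]
      have : n - ((ws.length : Int) + 1) - 1 + 2 = n - ws.length := by ring
      simp [this]
    push_cast
    push_cast at hhead hidx
    rw [hhead, hidx]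

-- per-combination agreement
theorem pvBuild_eq (n : Int) (hn : 1 ≤ n) (vs : List String) (hl : vs.length = n.toNat) :
    pvBuildA vs = (pvPrefixB n ++ PySem.Str.join "" ([] ++ pvChunks n n.toNat vs), n + 1) := by
  cases vs with
  | nil => exfalso; simp at hl; omega
  | cons v0 rest =>
    have hr : rest.length + 1 = n.toNat := by simpa using hl
    have h1 : n - (rest.length : Int) = 1 := by omega
    have hA : pvBuildA (v0 :: rest)
        = (PySem.List.enumerate rest).foldl pvStepA ("(_a0_ + (_a1_ * " ++ v0 ++ "))", 2) := rfl
    rw [hA, pvFoldA_char]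
    rw [List.nil_append, ← hr]
    simp only [pvChunks]
    rw [h1]
    have hch : pvChunkB 1 v0 = "(_a0_ + (_a1_ * " ++ v0 ++ "))" := by
      unfold pvChunkB; rw [if_pos rfl]
    rw [hch, pvChunks_enum n rest (by omega), h1]
    refine Prod.ext ?_ (by simp; omega)
    apply String.toList_inj.mp
    have hp : pvPrefixB n = String.ofList (List.replicate rest.length '(') := by
      unfold pvPrefixB
      rw [show (n - 1).toNat = rest.length by omega]
    rw [hp]
    have h0 : (1 : Int) - 1 = 0 := by ring
    rw [h0]
    simp [PySem.Str.toList_join, pvJoin_empty, List.append_assoc]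

-- ===== VERDICT (by name: the statement is the Claim_ definition above) =====
theorem get_expressions_n_spec : Claim_equal_get_expressions_n := by
  intro the_vars n _ hpre
  unfold Spec_get_expressions_n get_expressions_n get_expressions_n_alt
  by_cases h0 : n = 0
  · simp [h0]
  · have hn : 1 ≤ n := by
      unfold Pre_get_expressions_n at hpre; omega
    have hgo := pvGoB_eq n the_vars n.toNat []
    have hk : ((n.toNat : Int)) = n := by omega
    rw [hk] at hgo
    simp only [beq_iff_eq, h0, if_false]
    rw [pvFoldl_append_map, hgo]
    simp only [List.nil_append]
    exact List.map_congr_left (fun vs hvs =>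
      pvBuild_eq n hn vs (pvComb_length n.toNat the_vars vs hvs))
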